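-- pv_equiv track=rewrite | github.com/ferhatazak/tic-tac-toe_and_more- | Application/morpion.py | creematrice
-- ===== SOURCE A (Python) =====
-- def creematrice(Tailletab:int)->list[list[str]]:
--     """
--     Fonction qui creer une matrice
--     Entree : entier
--     Sortie : tableau contenant un tableau de chaine de caractere
--     """
--     val:str
--     i:int
--     indice:int
--     tabmatrice:list[list[str]]
--     ligne:list[str]
--     nbval:int
--     nbval=Tailletab**2
--     tabmatrice=[['']]*Tailletab
--
--     for i in range(Tailletab):
--         ligne=['']*Tailletab
--         for indice in range (Tailletab,0,-1):
--             val=str(nbval)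
--             nbval=nbval-1
--             ligne[indice-1]=val
--         tabmatrice[i]=ligne
--     return(tabmatrice)
-- ===== SOURCE B (Python) =====
-- def creematrice(Tailletab: int) -> list[list[str]]:
--     m = max(Tailletab, 0)
--     flat = [str(k) for k in range(1, m * m + 1)]
--     rows = [flat[i * m:(i + 1) * m] for i in range(m)]
--     return rows[::-1]
-- ===== Notes on version B (the rewrite author's own statement) =====
-- stated objective: simpler
-- what changed: Replaces A's descending-counter nested reverse-fill into preallocated mutable rows with a single flat ascending comprehension that is reshaped by slicing and reversed.
import Mathlib
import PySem

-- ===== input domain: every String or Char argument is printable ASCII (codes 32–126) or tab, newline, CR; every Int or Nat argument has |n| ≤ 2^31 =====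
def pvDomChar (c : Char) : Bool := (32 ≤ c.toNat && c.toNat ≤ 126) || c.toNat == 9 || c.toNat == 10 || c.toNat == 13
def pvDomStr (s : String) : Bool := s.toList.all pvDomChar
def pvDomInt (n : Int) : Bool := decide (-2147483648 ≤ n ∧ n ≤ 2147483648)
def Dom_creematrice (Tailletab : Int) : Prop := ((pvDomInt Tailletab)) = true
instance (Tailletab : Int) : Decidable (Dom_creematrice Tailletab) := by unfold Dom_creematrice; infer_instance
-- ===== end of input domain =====

-- B replaces A's descending-counter reverse-fill nested loops by building the flat
-- ascending list of number strings once, reshaping it into rows by slicing, and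
-- reversing the row list (objective: simpler).

-- ===== PORT A =====
-- inner loop body: ligne[indice-1] = str(nbval); nbval = nbval - 1
-- (indice runs over range(Tailletab, 0, -1), so indice-1 is always a valid
--  nonnegative index of ligne; .toNat and List.set are exact here)
def creeInnerStep (st : List String × Int) (indice : Int) : List String × Int :=
  (st.1.set (indice - 1).toNat (PySem.Int.toStr st.2), st.2 - 1)

-- outer loop body: ligne = ['']*Tailletab; inner loop; tabmatrice[i] = ligne
-- (i runs over range(Tailletab): a valid nonnegative index of tabmatrice)
def creeOuterStep (Tailletab : Int) (st : List (List String) × Int) (i : Int) :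
    List (List String) × Int :=
  let inner :=
    (PySem.List.pyRange Tailletab 0 (-1)).foldl creeInnerStep
      (List.replicate Tailletab.toNat "", st.2)
  (st.1.set i.toNat inner.1, inner.2)

def creematrice (Tailletab : Int) : List (List String) :=
  let nbval : Int := Tailletab ^ 2
  -- [['']]*Tailletab : Python list repetition, empty for Tailletab ≤ 0
  let tabmatrice : List (List String) := List.replicate Tailletab.toNat [""]
  ((PySem.List.pyRange 0 Tailletab 1).foldl (creeOuterStep Tailletab)
    (tabmatrice, nbval)).1

-- ===== PORT B =====
def creematrice_alt (Tailletab : Int) : List (List String) :=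
  let m := max Tailletab 0
  let flat := (PySem.List.pyRange 1 (m * m + 1) 1).map PySem.Int.toStr
  let rows := (PySem.List.pyRange 0 m 1).map (fun i =>
    PySem.List.slice flat (some (i * m)) (some ((i + 1) * m)))
  -- rows[::-1] is reversal (PySem.List.slice?_none_none_neg_one)
  rows.reverse

-- ===== PRECONDITION & SPEC =====
def Spec_creematrice (Tailletab : Int) (out : List (List String)) : Prop := out = creematrice_alt Tailletab
instance (Tailletab : Int) (out : List (List String)) : Decidable (Spec_creematrice Tailletab out) := by unfold Spec_creematrice; infer_instance

-- ===== CLAIM (what is proved, stated in full; the proofs are below) =====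
def Claim_equal_creematrice : Prop := ∀ (Tailletab : Int), Dom_creematrice Tailletab → Spec_creematrice Tailletab (creematrice Tailletab)

-- ===== LEMMAS AND PROOFS =====

-- the row holding the values v-n+1 … v as strings, in ascending order
def rowOf (n v : Int) : List String :=
  (PySem.List.pyRange (v - n + 1) (v + 1) 1).map PySem.Int.toStr

lemma drop_set_self {α : Type} (L : List α) (k : Nat) (x : α) (hk : k < L.length) :
    (L.set k x).drop k = x :: L.drop (k + 1) := by
  rw [List.drop_set]
  simp only [lt_irrefl, if_false, Nat.sub_self]
  rw [List.drop_eq_getElem_cons (by simpa using hk)]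
  rfl


lemma inner_fold (c : Int) (hc : 0 ≤ c) :
    ∀ (L : List String) (v : Int), c ≤ (L.length : Int) →
    (PySem.List.pyRange c 0 (-1)).foldl creeInnerStep (L, v)
      = ((PySem.List.pyRange (v - c + 1) (v + 1) 1).map PySem.Int.toStr ++ L.drop c.toNat,
         v - c) := by
  obtain ⟨k, rfl⟩ := Int.eq_ofNat_of_zero_le hc
  induction k with
  | zero =>
    intro L v _
    rw [PySem.List.pyRange_neg_one_eq_nil (by omega),
        PySem.List.pyRange_one_eq_nil (by omega)]
    simp
  | succ k ih =>
    intro L v hlen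
    rw [PySem.List.pyRange_neg_one_cons (by omega)]
    simp only [List.foldl_cons]
    have hstep : creeInnerStep (L, v) ((k : Int) + 1)
        = (L.set k (PySem.Int.toStr v), v - 1) := by
      simp [creeInnerStep]
    push_cast
    rw [hstep]
    have hk : (k : Int) ≤ ((L.set k (PySem.Int.toStr v)).length : Int) := by
      simp; push_cast at hlen; omega
    have := ih (by positivity) (L.set k (PySem.Int.toStr v)) (v - 1) hk
    push_cast at this ⊢
    rw [show (k : Int) + 1 - 1 = (k : Int) by ring, this]
    simp only [Int.toNat_natCast] at this ⊢
    rw [drop_set_self L k _ (by push_cast at hlen; omega)]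
    have h1 : ((k:Int) + 1).toNat = k + 1 := by omega
    have h2 : PySem.List.pyRange (v - ((k:Int)+1) + 1) (v + 1) 1
        = PySem.List.pyRange (v - ((k:Int)+1) + 1) v 1 ++ [v] := by
      have hle : v - ((k:Int)+1) + 1 ≤ v := by omega
      simpa using PySem.List.pyRange_one_succ_right hle
    rw [h1, h2, List.map_append, List.append_assoc]
    rw [show v - 1 - (k:Int) + 1 = v - ((k:Int)+1) + 1 by ring, show v - 1 + 1 = v by ring,
        show v - 1 - (k:Int) = v - ((k:Int)+1) by ring]
    rfl
lemma take_set_succ {α : Type} (L : List α) (a : Nat) (x : α) (ha : a < L.length) :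
    (L.set a x).take (a+1) = L.take a ++ [x] := by
  rw [List.take_add_one, List.take_set, List.getElem?_set_self (by simpa using ha)]
  rw [List.set_eq_of_length_le (by simp)]
  simp

lemma outer_fold (n : Int) (hn : 0 ≤ n) :
    ∀ (j : Nat) (a : Int) (T : List (List String)) (v : Int),
      0 ≤ a → a + j = n → (T.length : Int) = n →
    ((PySem.List.pyRange a n 1).foldl (creeOuterStep n) (T, v)).1
      = T.take a.toNat ++ (List.range j).map (fun k : Nat => rowOf n (v - (k : Int) * n)) := by
  intro j
  induction j with
  | zero =>
    intro a T v ha hj hT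
    rw [PySem.List.pyRange_one_eq_nil (by omega)]
    simp only [List.foldl_nil, List.range_zero, List.map_nil, List.append_nil]
    exact (List.take_of_length_le (by omega)).symm
  | succ j ih =>
    intro a T v ha hj hT
    rw [PySem.List.pyRange_one_cons (by omega)]
    simp only [List.foldl_cons]
    have hstep : creeOuterStep n (T, v) a = (T.set a.toNat (rowOf n v), v - n) := by
      unfold creeOuterStep
      rw [inner_fold n hn _ v (by simp)]
      simp [rowOf]
    rw [hstep, ih (a+1) _ (v - n) (by omega) (by omega) (by simpa using hT)]
    have haN : a.toNat < T.length := by omega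
    have h1 : (a+1).toNat = a.toNat + 1 := by omega
    rw [h1, take_set_succ T a.toNat _ haN]
    rw [List.range_succ_eq_map, List.map_cons, List.map_map]
    simp only [Nat.cast_zero, zero_mul, sub_zero, List.append_assoc, List.singleton_append]
    congr 2
    apply List.map_congr_left
    intro k _
    simp only [Function.comp]
    congr 1
    push_cast
    ring

lemma creematrice_closed (n : Int) (hn : 0 ≤ n) :
    creematrice n
      = (List.range n.toNat).map (fun k : Nat => rowOf n (n * n - (k : Int) * n)) := by
  unfold creematrice
  rw [outer_fold n hn n.toNat 0 _ (n^2) le_rfl (by omega) (by simp; omega)]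
  simp only [Int.toNat_zero, List.take_zero, List.nil_append]
  apply List.map_congr_left
  intro k _
  congr 1
  ring

lemma slice_flat (n : Int) (i : Int) (hi : 0 ≤ i) (hin : i < n) :
    PySem.List.slice ((PySem.List.pyRange 1 (n * n + 1) 1).map PySem.Int.toStr)
      (some (i * n)) (some ((i + 1) * n)) = rowOf n ((i + 1) * n) := by
  have hn : 0 < n := by omega
  have h0 : (0:Int) ≤ i * n := mul_nonneg hi (by omega)
  have hsplit : PySem.List.pyRange 1 (n*n+1) 1 =
      PySem.List.pyRange 1 (i*n+1) 1 ++
        (PySem.List.pyRange (i*n+1) ((i+1)*n+1) 1 ++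
          PySem.List.pyRange ((i+1)*n+1) (n*n+1) 1) := by
    rw [← PySem.List.pyRange_one_append (i*n+1) ((i+1)*n+1) (n*n+1) (by nlinarith) (by nlinarith)]
    exact PySem.List.pyRange_one_append 1 (i*n+1) (n*n+1) (by nlinarith) (by nlinarith)
  rw [PySem.List.slice_toNat _ h0 (by nlinarith), hsplit]
  simp only [List.map_append]
  rw [show (i*n).toNat
        = ((PySem.List.pyRange 1 (i*n+1) 1).map PySem.Int.toStr).length by
      simp [PySem.List.length_pyRange_one]]
  rw [List.drop_left]
  rw [show ((i+1)*n).toNat - ((PySem.List.pyRange 1 (i*n+1) 1).map PySem.Int.toStr).length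
        = ((PySem.List.pyRange (i*n+1) ((i+1)*n+1) 1).map PySem.Int.toStr).length by
      simp [PySem.List.length_pyRange_one]; omega]
  rw [List.take_left]
  unfold rowOf
  congr 2
  ring

lemma creematrice_alt_closed (n : Int) (hn : 0 < n) :
    creematrice_alt n
      = (List.range n.toNat).map (fun k : Nat => rowOf n (n * n - (k : Int) * n)) := by
  unfold creematrice_alt
  dsimp only
  rw [show max n 0 = n from max_eq_left hn.le]
  rw [PySem.List.pyRange_one 0 n, List.map_map]
  have hrows : (List.range (n - 0).toNat).map
      ((fun i => PySem.List.slice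
          ((PySem.List.pyRange 1 (n * n + 1) 1).map PySem.Int.toStr)
          (some (i * n)) (some ((i + 1) * n))) ∘ (fun k : Nat => (0:Int) + k))
      = (List.range n.toNat).map (fun k : Nat => rowOf n (((k:Int) + 1) * n)) := by
    rw [show n - 0 = n by ring]
    apply List.map_congr_left
    intro k hk
    simp only [Function.comp, zero_add]
    exact slice_flat n k (by positivity) (by simp at hk; omega)
  rw [hrows]
  apply List.ext_getElem
  · simp
  · intro j h1 h2
    simp only [List.getElem_reverse, List.length_map, List.length_range, List.getElem_map,
      List.getElem_range]
    have hj : j < n.toNat := by simpa using h2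
    congr 1
    have hcast : ((n.toNat - 1 - j : Nat) : Int) = n - 1 - (j : Int) := by omega
    rw [hcast]
    ring

-- ===== VERDICT (by name: the statement is the Claim_ definition above) =====
theorem creematrice_spec : Claim_equal_creematrice := by
  intro n _
  show creematrice n = creematrice_alt n
  rcases le_or_gt n 0 with h | h
  · unfold creematrice creematrice_alt
    dsimp only
    rw [show max n 0 = 0 from max_eq_right h, PySem.List.pyRange_one_eq_nil h,
        PySem.List.pyRange_one_eq_nil le_rfl]
    simp [Int.toNat_of_nonpos h]
  · rw [creematrice_closed n h.le, creematrice_alt_closed n h]
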